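-- pv_equiv track=rewrite | github.com/NicholasFan235/Codewars | Faberge Easter Egg Crush Easy/SolutionDP.py | height
-- ===== SOURCE A (Python) =====
-- def height(n, m):
--     if (n==0 or m==0):
--         return 0
--
--     dp = [[0 for x in range(m+1)] for x in range(2)]
--     for j in range(1, m+1):
--         dp[1][j] = j
--     i = 1
--     while (i < n):
--         i += 1
--         for j in range(1, m+1):
--             dp[i%2][j] = 1 + dp[(i+1)%2][j-1] + dp[i%2][j-1]
--     return dp[n%2][m]
-- ===== SOURCE B (Python) =====
-- def height(n, m):
--     # closed form: sum_{k=1}^{min(n,m)} C(m,k), binomials computed incrementally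
--     total = 0
--     c = 1
--     for k in range(1, min(n, m) + 1):
--         c = c * (m - k + 1) // k
--         total += c
--     return total
-- ===== Notes on version B (the rewrite author's own statement) =====
-- stated objective: faster
-- what changed: replaces the O(n*m) two-row dynamic programme with the closed form sum_{k=1}^{min(n,m)} C(m,k) computed with incrementally updated binomial coefficients
-- outside the precondition, e.g. on height(-1, 5): A returns 5, B returns 0; on height(0, -3): A returns 0, B returns 0; on height(2, -3): A raises IndexError, B returns 0
import Mathlib
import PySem

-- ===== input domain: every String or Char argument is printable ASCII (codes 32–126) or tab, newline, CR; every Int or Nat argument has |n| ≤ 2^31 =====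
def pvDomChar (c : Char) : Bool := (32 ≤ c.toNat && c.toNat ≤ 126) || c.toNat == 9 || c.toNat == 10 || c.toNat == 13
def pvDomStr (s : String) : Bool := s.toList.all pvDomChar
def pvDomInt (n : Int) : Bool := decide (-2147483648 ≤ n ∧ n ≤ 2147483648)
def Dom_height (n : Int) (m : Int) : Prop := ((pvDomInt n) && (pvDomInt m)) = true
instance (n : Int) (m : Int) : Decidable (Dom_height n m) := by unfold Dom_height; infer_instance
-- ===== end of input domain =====

-- B replaces A's O(n*m) two-row DP by the closed form sum_{k=1}^{min(n,m)} C(m,k)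
-- with incrementally updated binomial coefficients (objective: faster, asymptotic).

-- ===== PORT A =====
-- inner 'for j in range(1, m+1): dp[i%2][j] = 1 + dp[(i+1)%2][j-1] + dp[i%2][j-1]'
def heightInner (other : List Int) (m : Int) (cur : List Int) : List Int :=
  (PySem.List.pyRange 1 (m + 1) 1).foldl
    (fun cur j => cur.set j.toNat (1 + other.getD (j - 1).toNat 0 + cur.getD (j - 1).toNat 0))
    cur

def height (n : Int) (m : Int) : Int :=
  if n = 0 ∨ m = 0 then 0
  else
    -- dp = [[0]*(m+1), [0]*(m+1)]; for j in range(1, m+1): dp[1][j] = j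
    let r0 : List Int := List.replicate (m + 1).toNat 0
    let r1 : List Int :=
      (PySem.List.pyRange 1 (m + 1) 1).foldl
        (fun r j => r.set j.toNat j) (List.replicate (m + 1).toNat 0)
    -- while (i < n): i += 1; <inner loop>   (i runs 2..n)
    let p : List Int × List Int :=
      (PySem.List.pyRange 2 (n + 1) 1).foldl
        (fun (p : List Int × List Int) i =>
          if PySem.Int.mod i 2 = 0 then (heightInner p.2 m p.1, p.2)
          else (p.1, heightInner p.1 m p.2))
        (r0, r1)
    if PySem.Int.mod n 2 = 0 then p.1.getD m.toNat 0 else p.2.getD m.toNat 0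

-- ===== PORT B =====
def height_alt (n : Int) (m : Int) : Int :=
  ((PySem.List.pyRange 1 (min n m + 1) 1).foldl
    (fun (p : Int × Int) k =>
      let c := PySem.Int.floordiv (p.2 * (m - k + 1)) k
      (p.1 + c, c))
    (0, 1)).1

-- ===== PRECONDITION & SPEC =====
-- Pre_ restricts to the natural domain of nonnegative egg/drop counts: for m < 0
-- (n ≠ 0) A raises IndexError, and for n < 0 A's return value is leftover dp state.
def Pre_height (n : Int) (m : Int) : Prop := 0 ≤ n ∧ 0 ≤ m
instance (n : Int) (m : Int) : Decidable (Pre_height n m) := by unfold Pre_height; infer_instance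
def pvWitness_height : Int × Int := (3, 5)
def Spec_height (n : Int) (m : Int) (out : Int) : Prop := out = height_alt n m
instance (n : Int) (m : Int) (out : Int) : Decidable (Spec_height n m out) := by unfold Spec_height; infer_instance

-- ===== CLAIM (what is proved, stated in full; the proofs are below) =====
def Claim_equal_height : Prop := ∀ (n : Int) (m : Int), Dom_height n m → Pre_height n m → Spec_height n m (height n m)

-- ===== LEMMAS AND PROOFS =====

/-- The mathematical value: `F i j = ∑_{k=1}^{i} C(j,k)`. -/
def F (i j : Nat) : Nat := ∑ k ∈ Finset.Icc 1 i, j.choose k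

lemma F_zero_left (j : Nat) : F 0 j = 0 := by simp [F]

lemma F_zero_right (i : Nat) : F i 0 = 0 := by
  unfold F
  apply Finset.sum_eq_zero
  intro k hk
  simp only [Finset.mem_Icc] at hk
  exact Nat.choose_eq_zero_of_lt (by omega)

lemma F_succ_left (i j : Nat) : F (i + 1) j = F i j + j.choose (i + 1) := by
  unfold F
  rw [← Finset.sum_Icc_succ_top (by omega)]

lemma F_one (j : Nat) : F 1 j = j := by
  simp [F, Nat.choose_one_right]

lemma F_succ_right (i j : Nat) (hi : 1 ≤ i) : F i (j + 1) = 1 + F (i - 1) j + F i j := by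
  induction i with
  | zero => omega
  | succ i ih =>
    rcases Nat.lt_or_ge 1 (i + 1) with h1 | h1
    · have hi' : 1 ≤ i := by omega
      have hih := ih hi'
      have hsplit : F i j = F (i - 1) j + j.choose i := by
        conv_lhs => rw [show i = (i - 1) + 1 by omega, F_succ_left, show i - 1 + 1 = i by omega]
      rw [F_succ_left, hih, F_succ_left, Nat.succ_sub_one,
        show (j + 1).choose (i + 1) = j.choose i + j.choose (i + 1) from Nat.choose_succ_succ j i]
      omega
    · have : i = 0 := by omega
      subst this
      simp [F_one, F_zero_left]; omega

lemma F_min (N M : Nat) : F (min N M) M = F N M := by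
  unfold F
  apply Finset.sum_subset
  · apply Finset.Icc_subset_Icc_right; exact min_le_left _ _
  · intro k hk hk2
    simp only [Finset.mem_Icc] at hk hk2
    exact Nat.choose_eq_zero_of_lt (by omega)

-- ===== A-side: loop invariants =====

/-- One write step of the inner loop. -/
def innerStep (other : List Int) (cur : List Int) (j : Int) : List Int :=
  cur.set j.toNat (1 + other.getD (j - 1).toNat 0 + cur.getD (j - 1).toNat 0)

lemma heightInner_eq (other cur : List Int) (m : Int) :
    heightInner other m cur = (PySem.List.pyRange 1 (m + 1) 1).foldl (innerStep other) cur := rfl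

/-- Invariant of the inner loop, fold over `range(1, t+1)`. -/
lemma inner_fold (other : List Int) (g h : Nat → Int)
    (hrec : ∀ j, h (j + 1) = 1 + g j + h j)
    (t : Nat) (cur : List Int)
    (hother : ∀ j : Nat, j < t → other.getD j 0 = g j)
    (hlen : t < cur.length)
    (hcur0 : cur.getD 0 0 = h 0) :
    ((PySem.List.pyRange 1 ((t : Int) + 1) 1).foldl (innerStep other) cur).length = cur.length ∧
      (∀ j : Nat, j ≤ t → ((PySem.List.pyRange 1 ((t : Int) + 1) 1).foldl (innerStep other) cur).getD j 0 = h j) ∧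
      (∀ j : Nat, t < j → ((PySem.List.pyRange 1 ((t : Int) + 1) 1).foldl (innerStep other) cur).getD j 0 = cur.getD j 0) := by
  induction t with
  | zero =>
    rw [PySem.List.pyRange_one_eq_nil (by norm_num)]
    refine ⟨rfl, ?_, fun j _ => rfl⟩
    intro j hj
    interval_cases j
    exact hcur0
  | succ t ih =>
    have hsplit := PySem.List.pyRange_one_append 1 ((t : Int) + 1) (((t + 1 : Nat) : Int) + 1)
      (by omega) (by push_cast; omega)
    have hrange : PySem.List.pyRange ((t : Int) + 1) (((t + 1 : Nat) : Int) + 1) 1 = [((t : Int) + 1)] := by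
      rw [show (((t + 1 : Nat) : Int) + 1) = ((t : Int) + 1) + 1 by push_cast; ring]
      exact PySem.List.pyRange_one_singleton _
    obtain ⟨ihl, ihin, ihout⟩ := ih (fun j hj => hother j (by omega)) (by omega)
    rw [hsplit, List.foldl_append, hrange]
    simp only [List.foldl_cons, List.foldl_nil]
    set r := (PySem.List.pyRange 1 ((t : Int) + 1) 1).foldl (innerStep other) cur with hr
    have hidx : ((t : Int) + 1).toNat = t + 1 := by omega
    have hidx' : ((t : Int) + 1 - 1).toNat = t := by omega
    have hstep : innerStep other r ((t : Int) + 1) = r.set (t + 1) (h (t + 1)) := by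
      unfold innerStep
      rw [hidx, hidx', hother t (by omega), ihin t (by omega), hrec t]
    rw [hstep]
    have hlenr : t + 1 < r.length := by omega
    refine ⟨by simp [ihl], ?_, ?_⟩
    · intro j hj
      rcases Nat.eq_or_lt_of_le hj with hje | hjl
      · rw [hje, List.getD_eq_getElem?_getD, List.getElem?_set_self (by omega)]
        rfl
      · rw [List.getD_eq_getElem?_getD, List.getElem?_set_ne (by omega), ← List.getD_eq_getElem?_getD]
        exact ihin j (by omega)
    · intro j hj
      rw [List.getD_eq_getElem?_getD, List.getElem?_set_ne (by omega), ← List.getD_eq_getElem?_getD]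
      exact ihout j (by omega)

-- ===== B-side: loop invariant =====

lemma b_fold (M : Nat) (t : Nat) (ht : t ≤ M) :
    (PySem.List.pyRange 1 ((t : Int) + 1) 1).foldl
      (fun (p : Int × Int) k =>
        let c := PySem.Int.floordiv (p.2 * ((M : Int) - k + 1)) k
        (p.1 + c, c))
      (0, 1) = ((F t M : Int), (M.choose t : Int)) := by
  induction t with
  | zero =>
    rw [PySem.List.pyRange_one_eq_nil (by norm_num)]
    simp [F_zero_left]
  | succ t ih =>
    have ht' : t ≤ M := by omega
    have hsplit := PySem.List.pyRange_one_append 1 ((t : Int) + 1) (((t + 1 : Nat) : Int) + 1)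
      (by omega) (by push_cast; omega)
    rw [hsplit, List.foldl_append, ih ht']
    have hrange : PySem.List.pyRange ((t : Int) + 1) (((t + 1 : Nat) : Int) + 1) 1 = [((t : Int) + 1)] := by
      rw [show (((t + 1 : Nat) : Int) + 1) = ((t : Int) + 1) + 1 by push_cast; ring]
      exact PySem.List.pyRange_one_singleton _
    rw [hrange]
    simp only [List.foldl_cons, List.foldl_nil]
    have hcast : ((M : Int) - ((t : Int) + 1) + 1) = ((M - t : Nat) : Int) := by
      have : (((M - t : Nat)) : Int) = (M : Int) - (t : Int) := by
        push_cast [Nat.cast_sub ht']; ring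
      rw [this]; ring
    have hc : PySem.Int.floordiv ((M.choose t : Int) * ((M : Int) - ((t : Int) + 1) + 1)) ((t : Int) + 1)
        = ((M.choose (t + 1) : Int)) := by
      rw [hcast, show ((t : Int) + 1) = ((t + 1 : Nat) : Int) by push_cast; ring,
        show ((M.choose t : Int) * ((M - t : Nat) : Int)) = ((M.choose t * (M - t) : Nat) : Int) by push_cast; ring,
        PySem.Int.floordiv_natCast, ← Nat.choose_succ_right_eq, Nat.mul_div_cancel _ (by omega)]
    simp only [hc]
    rw [Prod.mk.injEq]
    refine ⟨?_, rfl⟩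
    rw [F_succ_left]; push_cast; ring

-- ===== initial row: for j in range(1, m+1): dp[1][j] = j =====

lemma init_fold (t : Nat) (cur : List Int)
    (hlen : t < cur.length) (hcur0 : cur.getD 0 0 = 0) :
    ((PySem.List.pyRange 1 ((t : Int) + 1) 1).foldl (fun r j => r.set j.toNat j) cur).length = cur.length ∧
      (∀ j : Nat, j ≤ t → ((PySem.List.pyRange 1 ((t : Int) + 1) 1).foldl (fun r j => r.set j.toNat j) cur).getD j 0 = ((F 1 j : Nat) : Int)) ∧
      (∀ j : Nat, t < j → ((PySem.List.pyRange 1 ((t : Int) + 1) 1).foldl (fun r j => r.set j.toNat j) cur).getD j 0 = cur.getD j 0) := by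
  induction t with
  | zero =>
    rw [PySem.List.pyRange_one_eq_nil (by norm_num)]
    refine ⟨rfl, ?_, fun j _ => rfl⟩
    intro j hj
    interval_cases j
    simpa [F_zero_right] using hcur0
  | succ t ih =>
    have hsplit := PySem.List.pyRange_one_append 1 ((t : Int) + 1) (((t + 1 : Nat) : Int) + 1)
      (by omega) (by push_cast; omega)
    have hrange : PySem.List.pyRange ((t : Int) + 1) (((t + 1 : Nat) : Int) + 1) 1 = [((t : Int) + 1)] := by
      rw [show (((t + 1 : Nat) : Int) + 1) = ((t : Int) + 1) + 1 by push_cast; ring]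
      exact PySem.List.pyRange_one_singleton _
    obtain ⟨ihl, ihin, ihout⟩ := ih (by omega)
    rw [hsplit, List.foldl_append, hrange]
    simp only [List.foldl_cons, List.foldl_nil]
    set r := (PySem.List.pyRange 1 ((t : Int) + 1) 1).foldl (fun r j => r.set j.toNat j) cur with hr
    have hidx : ((t : Int) + 1).toNat = t + 1 := by omega
    rw [hidx]
    refine ⟨by simp [ihl], ?_, ?_⟩
    · intro j hj
      rcases Nat.eq_or_lt_of_le hj with hje | hjl
      · rw [hje, List.getD_eq_getElem?_getD, List.getElem?_set_self (by omega)]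
        simp [F_one]
      · rw [List.getD_eq_getElem?_getD, List.getElem?_set_ne (by omega), ← List.getD_eq_getElem?_getD]
        exact ihin j (by omega)
    · intro j hj
      rw [List.getD_eq_getElem?_getD, List.getElem?_set_ne (by omega), ← List.getD_eq_getElem?_getD]
      exact ihout j (by omega)

-- ===== outer loop: while (i < n) =====

def outerStep (M : Nat) (p : List Int × List Int) (i : Int) : List Int × List Int :=
  if PySem.Int.mod i 2 = 0 then (heightInner p.2 (M : Int) p.1, p.2)
  else (p.1, heightInner p.1 (M : Int) p.2)

lemma outer_fold (M : Nat) (t : Nat) (ht : 1 ≤ t) (r0 r1 : List Int)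
    (hl0 : r0.length = M + 1) (hl1 : r1.length = M + 1)
    (h0 : ∀ j : Nat, j ≤ M → r0.getD j 0 = ((F 0 j : Nat) : Int))
    (h1 : ∀ j : Nat, j ≤ M → r1.getD j 0 = ((F 1 j : Nat) : Int)) :
    ((PySem.List.pyRange 2 ((t : Int) + 1) 1).foldl (outerStep M) (r0, r1)).1.length = M + 1 ∧
      ((PySem.List.pyRange 2 ((t : Int) + 1) 1).foldl (outerStep M) (r0, r1)).2.length = M + 1 ∧
      (∀ j : Nat, j ≤ M →
        (if t % 2 = 0 then ((PySem.List.pyRange 2 ((t : Int) + 1) 1).foldl (outerStep M) (r0, r1)).1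
         else ((PySem.List.pyRange 2 ((t : Int) + 1) 1).foldl (outerStep M) (r0, r1)).2).getD j 0
          = ((F t j : Nat) : Int)) ∧
      (∀ j : Nat, j ≤ M →
        (if t % 2 = 0 then ((PySem.List.pyRange 2 ((t : Int) + 1) 1).foldl (outerStep M) (r0, r1)).2
         else ((PySem.List.pyRange 2 ((t : Int) + 1) 1).foldl (outerStep M) (r0, r1)).1).getD j 0
          = ((F (t - 1) j : Nat) : Int)) := by
  induction t with
  | zero => omega
  | succ t ih =>
    rcases Nat.lt_or_ge t 1 with h1t | h1t
    · -- base case t + 1 = 1 : empty range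
      have : t = 0 := by omega
      subst this
      rw [PySem.List.pyRange_one_eq_nil (by norm_num)]
      simpa using ⟨hl0, hl1, h1, h0⟩
    · obtain ⟨ihl1, ihl2, ihact, ihoth⟩ := ih h1t
      have hsplit := PySem.List.pyRange_one_append 2 ((t : Int) + 1) (((t + 1 : Nat) : Int) + 1)
        (by omega) (by push_cast; omega)
      have hrange : PySem.List.pyRange ((t : Int) + 1) (((t + 1 : Nat) : Int) + 1) 1 = [((t : Int) + 1)] := by
        rw [show (((t + 1 : Nat) : Int) + 1) = ((t : Int) + 1) + 1 by push_cast; ring]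
        exact PySem.List.pyRange_one_singleton _
      rw [hsplit, List.foldl_append, hrange]
      simp only [List.foldl_cons, List.foldl_nil]
      set p := (PySem.List.pyRange 2 ((t : Int) + 1) 1).foldl (outerStep M) (r0, r1) with hp
      have hmod : PySem.Int.mod ((t : Int) + 1) 2 = (((t + 1) % 2 : Nat) : Int) := by
        rw [show ((t : Int) + 1) = ((t + 1 : Nat) : Int) by push_cast; ring]
        exact_mod_cast PySem.Int.mod_natCast (t + 1) 2
      have hrec : ∀ j : Nat, ((F (t + 1) (j + 1) : Nat) : Int)
          = 1 + ((F t j : Nat) : Int) + ((F (t + 1) j : Nat) : Int) := by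
        intro j
        rw [F_succ_right (t + 1) j (by omega), Nat.succ_sub_one]
        push_cast; ring
      rcases Nat.even_or_odd (t + 1) with hpar | hpar
      · -- (t+1) % 2 = 0, t % 2 = 1 : active row was p.2 (F t), overwrite p.1
        have he2 : (t + 1) % 2 = 0 := Nat.even_iff.mp hpar
        have hto : t % 2 = 1 := by omega
        rw [hto] at ihact ihoth
        simp only [Nat.one_ne_zero, if_false] at ihact ihoth
        have hstep : outerStep M p ((t : Int) + 1) = (heightInner p.2 (M : Int) p.1, p.2) := by
          unfold outerStep
          rw [hmod, he2]
          simp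
        rw [hstep, he2]
        obtain ⟨hL, hIn, _⟩ := inner_fold p.2 (fun j => ((F t j : Nat) : Int))
          (fun j => ((F (t + 1) j : Nat) : Int)) hrec M p.1
          (fun j hj => ihact j (by omega))
          (by omega)
          (by show p.1.getD 0 0 = ((F (t + 1) 0 : Nat) : Int)
              rw [ihoth 0 (Nat.zero_le M), F_zero_right, F_zero_right])
        rw [heightInner_eq]
        refine ⟨by simpa using hL.trans ihl1, ihl2, ?_, ?_⟩
        · simpa using fun j hj => hIn j hj
        · simpa using fun j hj => ihact j hj
      · -- (t+1) % 2 = 1, t % 2 = 0 : active row was p.1 (F t), overwrite p.2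
        have he2 : (t + 1) % 2 = 1 := Nat.odd_iff.mp hpar
        have hto : t % 2 = 0 := by omega
        rw [hto] at ihact ihoth
        simp only [if_true] at ihact ihoth
        have hstep : outerStep M p ((t : Int) + 1) = (p.1, heightInner p.1 (M : Int) p.2) := by
          unfold outerStep
          rw [hmod, he2]
          norm_num
        rw [hstep, he2]
        obtain ⟨hL, hIn, _⟩ := inner_fold p.1 (fun j => ((F t j : Nat) : Int))
          (fun j => ((F (t + 1) j : Nat) : Int)) hrec M p.2
          (fun j hj => ihact j (by omega))
          (by omega)
          (by show p.2.getD 0 0 = ((F (t + 1) 0 : Nat) : Int)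
              rw [ihoth 0 (Nat.zero_le M), F_zero_right, F_zero_right])
        rw [heightInner_eq]
        refine ⟨ihl1, by simpa using hL.trans ihl2, ?_, ?_⟩
        · simpa using fun j hj => hIn j hj
        · simpa using fun j hj => ihact j hj

-- ===== final assembly =====

lemma height_alt_closed (N M : Nat) :
    height_alt (N : Int) (M : Int) = ((F N M : Nat) : Int) := by
  unfold height_alt
  rw [show min ((N : Int)) ((M : Int)) = (((min N M : Nat)) : Int) from (Nat.cast_min N M).symm]
  rw [b_fold M (min N M) (min_le_right N M), F_min]

lemma height_closed (N M : Nat) (hN : 1 ≤ N) (hM : 1 ≤ M) :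
    height (N : Int) (M : Int) = ((F N M : Nat) : Int) := by
  unfold height
  rw [if_neg (by rintro (h | h) <;> omega)]
  simp only []
  rw [show (((M : Int)) + 1).toNat = M + 1 by omega]
  -- initial rows
  have hrep : ∀ j : Nat, j ≤ M → (List.replicate (M + 1) (0 : Int)).getD j 0 = ((F 0 j : Nat) : Int) := by
    intro j hj
    rw [F_zero_left, List.getD_eq_getElem?_getD, List.getElem?_replicate]
    simp [Nat.lt_succ_of_le hj]
  obtain ⟨hl1, hin1, _⟩ := init_fold M (List.replicate (M + 1) (0 : Int))
    (by simp) (by simp [List.getD_eq_getElem?_getD])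
  set r1 := (PySem.List.pyRange 1 ((M : Int) + 1) 1).foldl (fun r j => r.set j.toNat j)
    (List.replicate (M + 1) (0 : Int)) with hr1
  have hfun : (fun (p : List Int × List Int) i =>
      if PySem.Int.mod i 2 = 0 then (heightInner p.2 ((M : Int)) p.1, p.2)
      else (p.1, heightInner p.1 ((M : Int)) p.2)) = outerStep M := rfl
  rw [hfun]
  obtain ⟨hL1, hL2, hact, _⟩ := outer_fold M N hN (List.replicate (M + 1) (0 : Int)) r1
    (by simp) (by simpa using hl1) hrep (fun j hj => hin1 j hj)
  set p := (PySem.List.pyRange 2 ((N : Int) + 1) 1).foldl (outerStep M) (List.replicate (M + 1) (0 : Int), r1) with hp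
  have hmod : PySem.Int.mod ((N : Int)) 2 = (((N % 2 : Nat)) : Int) := by
    exact_mod_cast PySem.Int.mod_natCast N 2
  have htn : ((M : Int)).toNat = M := by omega
  rcases Nat.even_or_odd N with he | ho
  · have h2 : N % 2 = 0 := Nat.even_iff.mp he
    rw [h2] at hact
    simp only [if_true] at hact
    rw [hmod, h2]
    simpa [htn] using hact M (le_refl M)
  · have h2 : N % 2 = 1 := Nat.odd_iff.mp ho
    rw [h2] at hact
    simp only [Nat.one_ne_zero, if_false] at hact
    rw [hmod, h2]
    have : ¬((1 : Nat) : Int) = 0 := by norm_num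
    rw [if_neg this]
    simpa [htn] using hact M (le_refl M)

theorem height_spec : Claim_equal_height := by
  intro n m _ hpre
  unfold Spec_height
  obtain ⟨hn, hm⟩ := hpre
  obtain ⟨N, rfl⟩ : ∃ N : Nat, n = (N : Int) := ⟨n.toNat, (Int.toNat_of_nonneg hn).symm⟩
  obtain ⟨M, rfl⟩ : ∃ M : Nat, m = (M : Int) := ⟨m.toNat, (Int.toNat_of_nonneg hm).symm⟩
  by_cases h0 : N = 0 ∨ M = 0
  · have hA : height (N : Int) (M : Int) = 0 := by
      unfold height
      rw [if_pos (by rcases h0 with h | h <;> simp [h])]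
    have hmin : min ((N : Int)) ((M : Int)) = 0 := by
      rcases h0 with h | h <;> simp [h]
    have hB : height_alt (N : Int) (M : Int) = 0 := by
      unfold height_alt
      rw [hmin, PySem.List.pyRange_one_eq_nil (by norm_num)]
      rfl
    rw [hA, hB]
  · have h0' : N ≠ 0 ∧ M ≠ 0 := by
      constructor <;> intro h <;> exact h0 (by simp [h])
    obtain ⟨hN0, hM0⟩ := h0'
    rw [height_closed N M (by omega) (by omega), height_alt_closed N M]
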